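-- pv_equiv track=rewrite | github.com/hwangdeokThien/CSC14003_Artificial_Intellignece_P1_Cryptarithmetic_Problem | level1_3.py | initialize_data
-- ===== SOURCE A (Python) =====
-- def initialize_data(data):
--     init_state = {char: -1 for char in data if char.isalpha()} # {'F': -1, 'G': -1, ...}
--     operators = ['+'] + [char for char in data if char in ('+', '-')]
--
--     data = data.replace('+', ' ')
--     data = data.replace('-', ' ')
--
--     temp = data.split('=')
--     operands = temp[0].split(' ')
--
--     result = temp[1]
--
--     max_len_operand = max(len(opr) for opr in operands)
--     tmp = max(len(result), max_len_operand)
--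
--     columns = [[] for _ in range(tmp)]
--     impact = [{} for _ in range(tmp)]
--
--     for i in range(len(operands)):
--         opr = operands[i]
--
--         for j in range(len(opr)):
--             id = len(opr) - j - 1
--
--             if not opr[j] in impact[id]:
--                 if operators[i] == '+':
--                     upper = 1
--                     lower = 0
--                 else:
--                     upper = 0
--                     lower = 1
--
--                 columns[id].append(opr[j])
--                 impact[id].update({opr[j]: (upper, lower)})
--             else:
--                 upper = impact[id][opr[j]][0]
--                 lower = impact[id][opr[j]][1]
--
--                 if operators[i] == '+':
--                     upper = upper + 1
--                 else:
--                     lower = lower + 1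
--
--                 impact[id].update({opr[j]: (upper, lower)})
--
--     for i in range(len(result)):
--         char = result[len(result)-i-1]
--
--         if char not in columns[i]:
--             columns[i].append(char)
--             impact[i].update({char: (0, 1)})
--         else:
--             upper = impact[i][char][0]
--             lower = impact[i][char][1] + 1
--             impact[i].update({char: (upper, lower)})
--
--     return init_state, columns, impact
-- ===== SOURCE B (Python) =====
-- def initialize_data(data):
--     init_state = {char: -1 for char in data if char.isalpha()}
--     operators = ['+'] + [char for char in data if char in ('+', '-')]
--
--     body = data.replace('+', ' ').replace('-', ' ')
--     temp = body.split('=')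
--     operands = temp[0].split(' ')
--     result = temp[1]
--
--     tmp = max(len(result), max(len(opr) for opr in operands))
--
--     def contribs(col):
--         # this column's contributions, in operand order then the result
--         out = [(opr[len(opr) - 1 - col], operators[i] == '+')
--                for i, opr in enumerate(operands) if col < len(opr)]
--         if col < len(result):
--             out.append((result[len(result) - 1 - col], False))
--         return out
--
--     columns, impact = [], []
--     for col in range(tmp):
--         cs = contribs(col)
--         chars = list(dict.fromkeys(c for c, _ in cs))
--         columns.append(chars)
--         impact.append({c: (sum(1 for d, p in cs if d == c and p),
--                            sum(1 for d, p in cs if d == c and not p))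
--                        for c in chars})
--     return init_state, columns, impact
-- ===== Notes on version B (the rewrite author's own statement) =====
-- stated objective: alternative
-- what changed: A builds columns/impact by incremental, branching in-place dict updates while scanning operands row by row; B is column-major: for each column it gathers that column's (char, sign) contributions directly, takes the distinct chars in first-appearance order, and computes each impact pair by counting plus/minus contributions - no incremental updates or membership branches at all.
import Mathlib
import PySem

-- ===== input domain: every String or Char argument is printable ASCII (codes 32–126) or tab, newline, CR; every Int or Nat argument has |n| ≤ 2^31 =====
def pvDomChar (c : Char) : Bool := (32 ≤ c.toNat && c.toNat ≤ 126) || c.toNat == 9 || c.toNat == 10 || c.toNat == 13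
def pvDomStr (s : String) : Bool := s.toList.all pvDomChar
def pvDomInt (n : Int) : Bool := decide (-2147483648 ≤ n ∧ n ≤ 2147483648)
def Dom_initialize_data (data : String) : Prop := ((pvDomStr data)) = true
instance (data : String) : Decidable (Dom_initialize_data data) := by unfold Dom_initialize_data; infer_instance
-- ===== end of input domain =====

-- B replaces A's incremental branching dict-update loops by a column-major pass: each column's
-- (char, sign) contributions are gathered directly, deduped for the column list, and the impact
-- pairs computed by counting (objective: alternative decomposition, same cost).

-- ===== PORT A =====
-- step of A's inner operand loop (body of `for j in range(len(opr))`)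
def pvStepOprChar (operators : List String) (i : Nat) (opr : List Char)
    (st : List (List String) × List (PySem.Dict String (Int × Int))) (q : Char × Nat) :
    List (List String) × List (PySem.Dict String (Int × Int)) :=
  let cols := st.1
  let imps := st.2
  let id := opr.length - q.2 - 1
  let c := String.singleton q.1
  let d := imps.getD id PySem.Dict.empty
  let op := (PySem.List.pyGet? operators (i : Int)).getD ""   -- operators[i]; in range whenever the Python returns
  if d.contains c = false then
    (cols.set id (cols.getD id [] ++ [c]),
     imps.set id (d.insert c (if op == "+" then ((1:Int),(0:Int)) else ((0:Int),(1:Int)))))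
  else
    let u := (d.getD c ((0:Int),(0:Int))).1
    let l := (d.getD c ((0:Int),(0:Int))).2
    (cols, imps.set id (d.insert c (if op == "+" then (u+1, l) else (u, l+1))))

-- step of A's result loop (body of `for i in range(len(result))`)
def pvStepRes (result : List Char)
    (st : List (List String) × List (PySem.Dict String (Int × Int))) (i : Nat) :
    List (List String) × List (PySem.Dict String (Int × Int)) :=
  let cols := st.1
  let imps := st.2
  let c := String.singleton (result.getD (result.length - i - 1) ' ')  -- in range: i < len(result)
  if (cols.getD i []).contains c = false then
    (cols.set i (cols.getD i [] ++ [c]),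
     imps.set i ((imps.getD i PySem.Dict.empty).insert c ((0:Int),(1:Int))))
  else
    let d := imps.getD i PySem.Dict.empty
    let u := (d.getD c ((0:Int),(0:Int))).1
    let l := (d.getD c ((0:Int),(0:Int))).2 + 1
    (cols, imps.set i (d.insert c (u, l)))

def initialize_data (data : String) : (List (String × Int)) × List (List String) × (List (List (String × Int × Int))) :=
  let cs := data.toList
  let init_state : PySem.Dict String Int :=
    cs.foldl (fun d c => if PySem.Chars.isalpha c then d.insert (String.singleton c) (-1) else d) PySem.Dict.empty
  let operators : List String :=
    "+" :: (cs.filter (fun c => c == '+' || c == '-')).map String.singleton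
  let cs2 := PySem.Chars.replace (PySem.Chars.replace cs ['+'] [' ']) ['-'] [' ']
  let temp := PySem.Chars.splitOn cs2 ['=']
  let operands := PySem.Chars.splitOn ((PySem.List.pyGet? temp 0).getD []) [' ']
  let result := (PySem.List.pyGet? temp 1).getD []          -- temp[1]; exists whenever the Python returns
  let max_len_operand := (operands.map List.length).foldl Nat.max 0
  let tmp := Nat.max result.length max_len_operand
  let st0 := (List.replicate tmp ([] : List String),
              List.replicate tmp (PySem.Dict.empty : PySem.Dict String (Int × Int)))
  let st1 := operands.zipIdx.foldl (fun st p => p.1.zipIdx.foldl (pvStepOprChar operators p.2 p.1) st) st0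
  let st2 := (List.range result.length).foldl (pvStepRes result) st1
  (init_state.items, st2.1, st2.2.map PySem.Dict.items)

-- ===== PORT B =====
-- Source B's `contribs(col)`: this column's (char, is_plus) contributions, operands then result
def pvColContribs (operators : List String) (operands : List (List Char)) (result : List Char) (col : Nat) :
    List (String × Bool) :=
  operands.zipIdx.flatMap (fun p =>
    if col < p.1.length then
      [(String.singleton (p.1.getD (p.1.length - 1 - col) ' '),
        ((PySem.List.pyGet? operators (p.2 : Int)).getD "") == "+")]
    else [])
  ++ (if col < result.length then
      [(String.singleton (result.getD (result.length - 1 - col) ' '), false)] else [])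

-- Source B's loop body for one column: the deduped char list and the counted impact dict (as items)
def pvColEntry (operators : List String) (operands : List (List Char)) (result : List Char) (col : Nat) :
    List String × List (String × Int × Int) :=
  let cs := pvColContribs operators operands result col
  let chars := PySem.Set.ofList (cs.map Prod.fst)     -- dict.fromkeys: distinct, first-appearance order
  (chars, chars.map (fun c =>
    (c, ((cs.countP (fun e => e.1 == c && e.2) : Nat) : Int),
        ((cs.countP (fun e => e.1 == c && !e.2) : Nat) : Int))))

def initialize_data_alt (data : String) : (List (String × Int)) × List (List String) × (List (List (String × Int × Int))) :=
  let cs := data.toList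
  let init_state : PySem.Dict String Int :=
    cs.foldl (fun d c => if PySem.Chars.isalpha c then d.insert (String.singleton c) (-1) else d) PySem.Dict.empty
  let operators : List String :=
    "+" :: (cs.filter (fun c => c == '+' || c == '-')).map String.singleton
  let body := PySem.Chars.replace (PySem.Chars.replace cs ['+'] [' ']) ['-'] [' ']
  let temp := PySem.Chars.splitOn body ['=']
  let operands := PySem.Chars.splitOn ((PySem.List.pyGet? temp 0).getD []) [' ']
  let result := (PySem.List.pyGet? temp 1).getD []
  let tmp := Nat.max result.length ((operands.map List.length).foldl Nat.max 0)
  let entries := (List.range tmp).map (pvColEntry operators operands result)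
  (init_state.items, entries.map Prod.fst, entries.map Prod.snd)

-- ===== PRECONDITION & SPEC =====
-- Pre_ excludes exactly the inputs on which the Python raises an IndexError: data containing no equals
-- sign (temp[1]), and data whose operand list has a non-empty operand at an index beyond the operator list (operators[i]).
def Pre_initialize_data (data : String) : Prop :=
  let cs := data.toList
  let nOps := 1 + cs.count '+' + cs.count '-'
  let parts := (cs.takeWhile (· ≠ '=')).splitOnP (fun c => c == ' ' || c == '+' || c == '-')
  '=' ∈ cs ∧ ∀ p ∈ parts.zipIdx, p.1 ≠ [] → p.2 < nOps
instance (data : String) : Decidable (Pre_initialize_data data) := by unfold Pre_initialize_data; infer_instance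

def pvWitness_initialize_data : String := "SEND+MORE=MONEY"

def Spec_initialize_data (data : String) (out : (List (String × Int)) × List (List String) × (List (List (String × Int × Int)))) : Prop := out = initialize_data_alt data
instance (data : String) (out : (List (String × Int)) × List (List String) × (List (List (String × Int × Int)))) : Decidable (Spec_initialize_data data out) := by unfold Spec_initialize_data; infer_instance

-- ===== CLAIM (what is proved, stated in full; the proofs are below) =====
def Claim_equal_initialize_data : Prop := ∀ (data : String), Dom_initialize_data data → Pre_initialize_data data → Spec_initialize_data data (initialize_data data)

-- ===== LEMMAS AND PROOFS =====

-- dict-level update for one (char, sign) contribution (A's impact[...] update, column fixed)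
def pvUpdD (d : PySem.Dict String (Int × Int)) (q : String × Bool) : PySem.Dict String (Int × Int) :=
  d.insert q.1 (if q.2 then ((d.getD q.1 ((0:Int),(0:Int))).1 + 1, (d.getD q.1 ((0:Int),(0:Int))).2)
                else ((d.getD q.1 ((0:Int),(0:Int))).1, (d.getD q.1 ((0:Int),(0:Int))).2 + 1))

-- event-level counting step (proof intermediate between A's loops and B's counts)
def pvStepB (imps : List (PySem.Dict String (Int × Int))) (e : Nat × String × Bool) :
    List (PySem.Dict String (Int × Int)) :=
  imps.set e.1 (pvUpdD (imps.getD e.1 PySem.Dict.empty) e.2)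

-- A's operand-loop step, rephrased on a (column, char, sign) event
def pvStepA (st : List (List String) × List (PySem.Dict String (Int × Int))) (e : Nat × String × Bool) :
    List (List String) × List (PySem.Dict String (Int × Int)) :=
  let cols := st.1
  let imps := st.2
  let d := imps.getD e.1 PySem.Dict.empty
  if d.contains e.2.1 = false then
    (cols.set e.1 (cols.getD e.1 [] ++ [e.2.1]),
     imps.set e.1 (d.insert e.2.1 (if e.2.2 then ((1:Int),(0:Int)) else ((0:Int),(1:Int)))))
  else
    let u := (d.getD e.2.1 ((0:Int),(0:Int))).1
    let l := (d.getD e.2.1 ((0:Int),(0:Int))).2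
    (cols, imps.set e.1 (d.insert e.2.1 (if e.2.2 then (u+1, l) else (u, l+1))))

-- the full (column, char, sign) event stream of A's two loops
def pvEvents (operators : List String) (operands : List (List Char)) (result : List Char) :
    List (Nat × String × Bool) :=
  operands.zipIdx.flatMap (fun p => p.1.zipIdx.map (fun q =>
    (p.1.length - q.2 - 1, String.singleton q.1,
     ((PySem.List.pyGet? operators (p.2 : Int)).getD "") == "+")))
  ++ (List.range result.length).map (fun i =>
    (i, String.singleton (result.getD (result.length - i - 1) ' '), false))

-- invariant transfer for one event: columns = keys of impact
lemma pvStepA_keys (imps : List (PySem.Dict String (Int × Int))) (e : Nat × String × Bool) :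
    pvStepA (imps.map PySem.Dict.keys, imps) e = ((pvStepB imps e).map PySem.Dict.keys, pvStepB imps e) := by
  obtain ⟨id, c, plus⟩ := e
  by_cases hid : id < imps.length
  · have hD : imps.getD id PySem.Dict.empty = imps[id] := List.getD_eq_getElem imps _ hid
    have hC : (imps.map PySem.Dict.keys).getD id [] = imps[id].keys := by
      simp [List.getD_eq_getElem?_getD, hid]
    by_cases hc : imps[id].contains c = false
    · have hG : imps[id].getD c ((0:Int),(0:Int)) = ((0:Int),(0:Int)) :=
        PySem.Dict.getD_of_not_contains (d := imps[id]) (d0 := ((0:Int),(0:Int))) (k := c) hc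
      simp only [pvStepA, pvStepB, pvUpdD, hD, hc, hC, hG, List.map_set,
        PySem.Dict.keys_insert_of_not_contains _ _ hc]
      norm_num
    · have hc : imps[id].contains c = true := by simpa using hc
      simp only [pvStepA, pvStepB, pvUpdD, hD, hc, Bool.true_eq_false, if_false, List.map_set,
        PySem.Dict.keys_insert_of_contains _ _ hc, hC]
      rw [show imps[id].keys = (List.map PySem.Dict.keys imps)[id]'(by simpa using hid) by simp,
        List.set_getElem_self]
  · have hid : imps.length ≤ id := by omega
    have h1 : imps.getD id PySem.Dict.empty = PySem.Dict.empty := by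
      simp [List.getD_eq_getElem?_getD, List.getElem?_eq_none hid]
    rw [pvStepA, pvStepB]
    simp [pvUpdD,
      List.set_eq_of_length_le (show (imps.map PySem.Dict.keys).length ≤ id by simpa using hid),
      List.set_eq_of_length_le hid]

-- A's result-loop step agrees with pvStepA on the corresponding minus event, given the invariant
lemma pvStepRes_eq_stepA (result : List Char) (imps : List (PySem.Dict String (Int × Int))) (i : Nat) :
    pvStepRes result (imps.map PySem.Dict.keys, imps) i =
      pvStepA (imps.map PySem.Dict.keys, imps)
        (i, String.singleton (result.getD (result.length - i - 1) ' '), false) := by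
  have hmem : ((imps.map PySem.Dict.keys).getD i []).contains
        (String.singleton (result.getD (result.length - i - 1) ' '))
      = (imps.getD i PySem.Dict.empty).contains
        (String.singleton (result.getD (result.length - i - 1) ' ')) := by
    by_cases hid : i < imps.length
    · have hD : imps.getD i PySem.Dict.empty = imps[i] := List.getD_eq_getElem imps _ hid
      have hC : (imps.map PySem.Dict.keys).getD i [] = imps[i].keys := by
        simp [List.getD_eq_getElem?_getD, hid]
      rw [hD, hC, PySem.Dict.contains_eq_decide_mem_keys]
      simp
    · have hid' : imps.length ≤ i := by omega
      have h1 : imps.getD i PySem.Dict.empty = PySem.Dict.empty := by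
        simp [List.getD_eq_getElem?_getD, List.getElem?_eq_none hid']
      have h2 : (imps.map PySem.Dict.keys).getD i [] = [] := by
        simp [List.getD_eq_getElem?_getD,
          List.getElem?_eq_none (show (imps.map PySem.Dict.keys).length ≤ i by simpa using hid')]
      rw [h1, h2]
      simp
  simp only [pvStepRes, pvStepA, hmem]
  split <;> simp

lemma foldl_stepA_keys (evs : List (Nat × String × Bool)) (imps : List (PySem.Dict String (Int × Int))) :
    evs.foldl pvStepA (imps.map PySem.Dict.keys, imps) =
      ((evs.foldl pvStepB imps).map PySem.Dict.keys, evs.foldl pvStepB imps) := by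
  induction evs generalizing imps with
  | nil => rfl
  | cons e tl ih => simp only [List.foldl_cons, pvStepA_keys, ih]

lemma foldl_stepRes_keys (result : List Char) (is : List Nat) (imps : List (PySem.Dict String (Int × Int))) :
    is.foldl (pvStepRes result) (imps.map PySem.Dict.keys, imps) =
      (((is.map (fun i => (i, String.singleton (result.getD (result.length - i - 1) ' '), false))).foldl pvStepB imps).map PySem.Dict.keys,
       (is.map (fun i => (i, String.singleton (result.getD (result.length - i - 1) ' '), false))).foldl pvStepB imps) := by
  induction is generalizing imps with
  | nil => rfl
  | cons i tl ih => simp only [List.foldl_cons, List.map_cons, pvStepRes_eq_stepA, pvStepA_keys, ih]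

-- A's two loops compute exactly the key-lists and dicts of the event fold
lemma pvLoops_eq (operators : List String) (operands : List (List Char)) (result : List Char) (tmp : Nat) :
    (List.range result.length).foldl (pvStepRes result)
      (operands.zipIdx.foldl (fun st p => p.1.zipIdx.foldl (pvStepOprChar operators p.2 p.1) st)
        (List.replicate tmp ([] : List String),
         List.replicate tmp (PySem.Dict.empty : PySem.Dict String (Int × Int))))
    = (((pvEvents operators operands result).foldl pvStepB (List.replicate tmp PySem.Dict.empty)).map PySem.Dict.keys,
       (pvEvents operators operands result).foldl pvStepB (List.replicate tmp PySem.Dict.empty)) := by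
  have h0 : (List.replicate tmp ([] : List String))
      = (List.replicate tmp (PySem.Dict.empty : PySem.Dict String (Int × Int))).map PySem.Dict.keys := by
    simp [List.map_replicate, PySem.Dict.keys_empty]
  have hop : ∀ st : List (List String) × List (PySem.Dict String (Int × Int)),
      operands.zipIdx.foldl (fun st p => p.1.zipIdx.foldl (pvStepOprChar operators p.2 p.1) st) st
      = (operands.zipIdx.flatMap (fun p => p.1.zipIdx.map (fun q =>
            (p.1.length - q.2 - 1, String.singleton q.1,
             ((PySem.List.pyGet? operators (p.2 : Int)).getD "") == "+")))).foldl pvStepA st := by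
    intro st
    rw [List.foldl_flatMap]
    congr 1
    funext st p
    rw [List.foldl_map]
    rfl
  rw [h0, hop, pvEvents, List.foldl_append, foldl_stepA_keys, foldl_stepRes_keys]

-- ===== column extraction from the event fold =====

lemma length_foldl_stepB (evs : List (Nat × String × Bool)) (imps : List (PySem.Dict String (Int × Int))) :
    (evs.foldl pvStepB imps).length = imps.length := by
  induction evs generalizing imps with
  | nil => rfl
  | cons e tl ih => simp [List.foldl_cons, ih, pvStepB]

lemma getD_foldl_stepB (evs : List (Nat × String × Bool)) (imps : List (PySem.Dict String (Int × Int)))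
    (col : Nat) (h : col < imps.length) :
    (evs.foldl pvStepB imps).getD col PySem.Dict.empty =
      ((evs.filter (fun e => e.1 == col)).map (fun e => e.2)).foldl pvUpdD (imps.getD col PySem.Dict.empty) := by
  induction evs generalizing imps with
  | nil => rfl
  | cons e tl ih =>
    by_cases he : e.1 = col
    · have hset : (pvStepB imps e).getD col PySem.Dict.empty
          = pvUpdD (imps.getD col PySem.Dict.empty) e.2 := by
        simp [pvStepB, he, List.getD_eq_getElem?_getD, h]
      simp only [List.foldl_cons, List.filter_cons]
      rw [ih (pvStepB imps e) (by simpa [pvStepB] using h), hset]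
      simp [he]
    · have hset : (pvStepB imps e).getD col PySem.Dict.empty
          = imps.getD col PySem.Dict.empty := by
        simp [pvStepB, List.getD_eq_getElem?_getD, he]
      simp only [List.foldl_cons, List.filter_cons]
      rw [ih (pvStepB imps e) (by simpa [pvStepB] using h), hset]
      simp [he]

-- ===== per-dict counting lemmas =====

lemma getD_foldl_updD (cs : List (String × Bool)) (d : PySem.Dict String (Int × Int)) (c : String) :
    (cs.foldl pvUpdD d).getD c ((0:Int),(0:Int)) =
      ((d.getD c ((0:Int),(0:Int))).1 + (cs.countP (fun e => e.1 == c && e.2) : Int),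
       (d.getD c ((0:Int),(0:Int))).2 + (cs.countP (fun e => e.1 == c && !e.2) : Int)) := by
  induction cs generalizing d with
  | nil => simp
  | cons e tl ih =>
    simp only [List.foldl_cons, ih, List.countP_cons]
    by_cases hc : e.1 = c
    · cases hb : e.2 <;>
        simp [pvUpdD, hc, hb, PySem.Dict.getD_insert_self] <;> ring
    · have h1 : (pvUpdD d e).getD c ((0:Int),(0:Int)) = d.getD c ((0:Int),(0:Int)) := by
        rw [pvUpdD, PySem.Dict.getD_insert_of_ne]
        exact fun h => hc h.symm
      have h2 : (e.1 == c) = false := by simp [hc]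
      simp [h1, h2]

lemma keys_foldl_updD (cs : List (String × Bool)) :
    (cs.foldl pvUpdD PySem.Dict.empty).keys = PySem.Set.ofList (cs.map Prod.fst) := by
  have h := PySem.Dict.keys_foldl_insert_key (l := cs) (key := Prod.fst)
    (f := fun d q => (if q.2 then ((d.getD q.1 ((0:Int),(0:Int))).1 + 1, (d.getD q.1 ((0:Int),(0:Int))).2)
                else ((d.getD q.1 ((0:Int),(0:Int))).1, (d.getD q.1 ((0:Int),(0:Int))).2 + 1)))
    (d := PySem.Dict.empty)
  simpa [pvUpdD, PySem.Dict.keys_empty, PySem.Set.update_nil_left] using h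

lemma nodup_keys_foldl_updD (cs : List (String × Bool)) :
    (cs.foldl pvUpdD PySem.Dict.empty).keys.Nodup := by
  have h := PySem.Dict.nodup_keys_foldl_insert_key (l := cs) (key := Prod.fst)
    (f := fun d q => (if q.2 then ((d.getD q.1 ((0:Int),(0:Int))).1 + 1, (d.getD q.1 ((0:Int),(0:Int))).2)
                else ((d.getD q.1 ((0:Int),(0:Int))).1, (d.getD q.1 ((0:Int),(0:Int))).2 + 1)))
    (d := PySem.Dict.empty) (by simp [PySem.Dict.keys_empty])
  simpa [pvUpdD] using h

lemma items_foldl_updD (cs : List (String × Bool)) :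
    (cs.foldl pvUpdD PySem.Dict.empty).items =
      (PySem.Set.ofList (cs.map Prod.fst)).map (fun c =>
        (c, ((cs.countP (fun e => e.1 == c && e.2) : Nat) : Int),
            ((cs.countP (fun e => e.1 == c && !e.2) : Nat) : Int))) := by
  rw [PySem.Dict.items_eq_map_keys _ (nodup_keys_foldl_updD cs) ((0:Int),(0:Int)), keys_foldl_updD]
  refine List.map_congr_left (fun c _ => ?_)
  rw [getD_foldl_updD]
  simp [PySem.Dict.getD_empty]

-- ===== the filtered event stream of a column is B's contribution list =====

lemma range_filter_beq (n col : Nat) :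
    (List.range n).filter (fun i => i == col) = if col < n then [col] else [] := by
  induction n with
  | zero => simp
  | succ n ih =>
    rw [List.range_succ, List.filter_append, ih]
    by_cases h1 : col < n
    · simp [h1, Nat.lt_succ_of_lt h1, show (n == col) = false by simp; omega]
    · by_cases h2 : col = n
      · simp [h2]
      · simp [h1, show ¬ col < n + 1 by omega, show (n == col) = false by simp; omega]

lemma zipIdx_filter_idx {α : Type} (l : List α) (j : Nat) :
    l.zipIdx.filter (fun q => q.2 == j) = if h : j < l.length then [(l[j], j)] else [] := by
  induction l using List.reverseRecOn with
  | nil => simp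
  | append_singleton l a ih =>
    rw [List.zipIdx_append, List.filter_append, ih]
    by_cases h1 : j < l.length
    · simp [h1, Nat.lt_succ_of_lt h1, List.getElem_append_left h1,
        show (l.length == j) = false by simp; omega]
    · by_cases h2 : j = l.length
      · simp [h2]
      · simp [h1, show ¬ j < l.length + 1 by omega, show (l.length == j) = false by simp; omega]

lemma zipIdx_filter_col (l : List Char) (col : Nat) (f : Char × Nat → Nat × String × Bool)
    (hf : ∀ q : Char × Nat, (f q).1 = l.length - q.2 - 1) :
    (l.zipIdx.map f).filter (fun e => e.1 == col) =
      if col < l.length then [f (l.getD (l.length - 1 - col) ' ', l.length - 1 - col)] else [] := by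
  rw [List.filter_map]
  by_cases hcol : col < l.length
  · have hcg : (l.zipIdx.filter (fun q => (f q).1 == col))
        = l.zipIdx.filter (fun q => q.2 == (l.length - 1 - col)) := by
      apply List.filter_congr
      intro q hq
      have hlt : q.2 < l.length := by have := (List.mem_zipIdx hq).2.1; omega
      rw [hf q]
      by_cases he : q.2 = l.length - 1 - col
      · simp [he]; omega
      · have : l.length - q.2 - 1 ≠ col := by omega
        simp [this, he]
    simp only [Function.comp_def, hcg]
    rw [zipIdx_filter_idx]
    have h2 : l.length - 1 - col < l.length := by omega
    simp [h2, hcol]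
  · have : ∀ q ∈ l.zipIdx, ¬ ((f q).1 == col) = true := by
      intro q hq
      have hlt : q.2 < l.length := by have := (List.mem_zipIdx hq).2.1; omega
      rw [hf q]
      simp
      omega
    simp only [Function.comp_def]
    rw [List.filter_eq_nil_iff.2 (by simpa using this)]
    simp [hcol]

lemma events_filter_col (operators : List String) (operands : List (List Char)) (result : List Char) (col : Nat) :
    ((pvEvents operators operands result).filter (fun e => e.1 == col)).map (fun e => e.2)
      = pvColContribs operators operands result col := by
  rw [pvEvents, pvColContribs, List.filter_append, List.map_append]
  congr 1
  · rw [List.filter_flatMap, List.map_flatMap]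
    refine List.flatMap_congr (fun p _ => ?_)
    rw [zipIdx_filter_col p.1 col _ (fun q => rfl)]
    by_cases h : col < p.1.length
    · have : p.1.length - (p.1.length - 1 - col) - 1 = col := by omega
      simp [h, this]
    · simp [h]
  · rw [List.filter_map]
    simp only [Function.comp_def]
    rw [range_filter_beq]
    by_cases h : col < result.length
    · simp [h, show result.length - 1 - col = result.length - col - 1 by omega]
    · simp [h]

-- the event fold, column by column, is B's per-column entry
lemma foldl_stepB_entry (operators : List String) (operands : List (List Char)) (result : List Char)
    (tmp col : Nat) (h : col < tmp) :
    ((pvEvents operators operands result).foldl pvStepB (List.replicate tmp PySem.Dict.empty)).getD col PySem.Dict.empty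
      = (pvColContribs operators operands result col).foldl pvUpdD PySem.Dict.empty := by
  rw [getD_foldl_stepB _ _ _ (by simpa using h), events_filter_col]
  simp [List.getD_eq_getElem?_getD, h]

lemma getElem_foldl_stepB_entry (operators : List String) (operands : List (List Char)) (result : List Char)
    (tmp col : Nat) (h : col < tmp)
    (h' : col < ((pvEvents operators operands result).foldl pvStepB (List.replicate tmp PySem.Dict.empty)).length) :
    ((pvEvents operators operands result).foldl pvStepB (List.replicate tmp PySem.Dict.empty))[col]'h'
      = (pvColContribs operators operands result col).foldl pvUpdD PySem.Dict.empty := by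
  rw [← List.getD_eq_getElem _ PySem.Dict.empty h']
  exact foldl_stepB_entry operators operands result tmp col h

theorem initialize_data_eq_alt (data : String) : initialize_data data = initialize_data_alt data := by
  simp only [initialize_data, initialize_data_alt, pvLoops_eq]
  refine congrArg (Prod.mk _) (congrArg₂ Prod.mk ?_ ?_)
  · apply List.ext_getElem
    · simp [length_foldl_stepB]
    · intro i h1 h2
      have hi := h2; simp only [List.length_map, List.length_range] at hi
      simp only [List.getElem_map, List.getElem_range]
      rw [getElem_foldl_stepB_entry _ _ _ _ _ hi]
      simp only [pvColEntry]
      exact keys_foldl_updD _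
  · apply List.ext_getElem
    · simp [length_foldl_stepB]
    · intro i h1 h2
      have hi := h2; simp only [List.length_map, List.length_range] at hi
      simp only [List.getElem_map, List.getElem_range]
      rw [getElem_foldl_stepB_entry _ _ _ _ _ hi]
      simp only [pvColEntry]
      exact items_foldl_updD _

-- ===== VERDICT (by name: the statement is the Claim_ definition above) =====
theorem initialize_data_spec : Claim_equal_initialize_data := by
  intro data _ _
  unfold Spec_initialize_data
  exact initialize_data_eq_alt data
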